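-- pv_equiv track=rewrite | github.com/2KAbhishek/TopGear-Python-Scripting-L1 | Assignments/ruler.py | ruler
-- ===== SOURCE A (Python) =====
-- def ruler(num: int) -> str:
--     rul, mark = 0, 1
--     numStr, first, second = '1234567890', '', ''
--     while rul <= num:
--         first += ' ' * 9 + repr(mark) if num - rul >= 10 else ''
--         second += numStr[:min(10, num - rul)]
--         mark += 1
--         rul += 10
--     return first + '\n' + second
-- ===== SOURCE B (Python) =====
-- def ruler(num: int) -> str:
--     full, rem = divmod(max(num, 0), 10)
--     first = ''.join(' ' * 9 + str(m) for m in range(1, full + 1))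
--     second = '1234567890' * full + '1234567890'[:rem]
--     return first + '\n' + second
-- ===== Notes on version B (the rewrite author's own statement) =====
-- stated objective: simpler
-- what changed: Replaced the while loop that steps through the number ten at a time while threading mark/first/second accumulators with divmod arithmetic: the digit line becomes string repetition plus one slice, and the marker line a join over a range of marker values.
import Mathlib
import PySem

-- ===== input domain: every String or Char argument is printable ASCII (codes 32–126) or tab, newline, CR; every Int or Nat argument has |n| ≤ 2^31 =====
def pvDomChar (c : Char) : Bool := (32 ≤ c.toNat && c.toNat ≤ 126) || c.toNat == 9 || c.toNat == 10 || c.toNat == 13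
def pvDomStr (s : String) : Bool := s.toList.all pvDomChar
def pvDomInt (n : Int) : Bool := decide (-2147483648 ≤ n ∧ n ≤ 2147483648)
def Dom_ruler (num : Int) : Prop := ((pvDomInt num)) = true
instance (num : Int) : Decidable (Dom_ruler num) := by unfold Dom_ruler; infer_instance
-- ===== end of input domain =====

-- B replaces A's 10-stepping while loop by divmod arithmetic plus string repetition (objective: simpler).
-- Strings are ported as ASCII char lists joined at the end (exact here: all characters involved are ASCII).

-- ===== PORT A =====
def pvNumStr : List Char := ['1', '2', '3', '4', '5', '6', '7', '8', '9', '0']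

-- the while loop of A: state (rul, mark, first, second)
def rulerLoop (num rul mark : Int) (first second : List Char) : String :=
  if _h : rul ≤ num then
    rulerLoop num (rul + 10) (mark + 1)
      (first ++ (if num - rul ≥ 10 then List.replicate 9 ' ' ++ PySem.Int.toChars mark else []))
      (second ++ PySem.List.slice pvNumStr none (some (min 10 (num - rul))))
  else
    String.ofList (first ++ '\n' :: second)
termination_by (num - rul + 10).toNat
decreasing_by omega

def ruler (num : Int) : String := rulerLoop num 0 1 [] []

-- ===== PORT B =====
-- ''.join over the generator is ported as a left fold of appends (exact).
def ruler_alt (num : Int) : String :=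
  String.ofList
    (((PySem.List.pyRange 1 (PySem.Int.floordiv (max num 0) 10 + 1)).foldl
        (fun acc m => acc ++ (List.replicate 9 ' ' ++ PySem.Int.toChars m)) []) ++
      '\n' :: (PySem.List.pyRepeat pvNumStr (PySem.Int.floordiv (max num 0) 10) ++
        PySem.List.slice pvNumStr none (some (PySem.Int.mod (max num 0) 10))))

-- ===== PRECONDITION & SPEC =====
def Spec_ruler (num : Int) (out : String) : Prop := out = ruler_alt num
instance (num : Int) (out : String) : Decidable (Spec_ruler num out) := by unfold Spec_ruler; infer_instance

-- ===== CLAIM (what is proved, stated in full; the proofs are below) =====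
def Claim_equal_ruler : Prop := ∀ (num : Int), Dom_ruler num → Spec_ruler num (ruler num)

-- ===== LEMMAS AND PROOFS =====

lemma pyRepeat_succ (xs : List Char) (n : Nat) :
    PySem.List.pyRepeat xs (((n + 1 : Nat)) : Int) = xs ++ PySem.List.pyRepeat xs (n : Int) := by
  simp [PySem.List.pyRepeat, List.replicate_succ]

lemma loop_eq (k : Nat) : ∀ (num rul mark : Int) (first second : List Char),
    num - rul = (k : Int) →
    rulerLoop num rul mark first second =
      String.ofList ((first ++ (PySem.List.pyRange mark (mark + ((k / 10 : Nat) : Int))).flatMap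
            (fun m => List.replicate 9 ' ' ++ PySem.Int.toChars m)) ++
          '\n' :: (second ++ (PySem.List.pyRepeat pvNumStr ((k / 10 : Nat) : Int) ++
            pvNumStr.take (k % 10)))) := by
  induction k using Nat.strong_induction_on with
  | _ k IH =>
    intro num rul mark first second hk
    have hle : rul ≤ num := by omega
    by_cases h10 : 10 ≤ k
    · -- full block: marker added, ten digits appended, recurse
      rw [rulerLoop, dif_pos hle, if_pos (by omega : num - rul ≥ 10)]
      have hmin : min 10 (num - rul) = (10 : Int) := by omega
      rw [hmin, PySem.List.slice_to pvNumStr (by norm_num)]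
      rw [IH (k - 10) (by omega) num (rul + 10) (mark + 1) _ _ (by omega)]
      have hdiv : k / 10 = (k - 10) / 10 + 1 := by omega
      have hmod : k % 10 = (k - 10) % 10 := by omega
      have hrange : PySem.List.pyRange mark (mark + ((k / 10 : Nat) : Int)) =
          mark :: PySem.List.pyRange (mark + 1) ((mark + 1) + (((k - 10) / 10 : Nat) : Int)) := by
        rw [show (mark + 1) + (((k - 10) / 10 : Nat) : Int) = mark + ((k / 10 : Nat) : Int) by omega]
        exact PySem.List.pyRange_one_cons (by omega)
      rw [hrange, hdiv, hmod, pyRepeat_succ]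
      simp [List.append_assoc, pvNumStr]
    · -- last (possibly partial) block, then the loop exits
      rw [rulerLoop, dif_pos hle, if_neg (by omega : ¬ num - rul ≥ 10)]
      have hmin : min 10 (num - rul) = (k : Int) := by omega
      rw [hmin, PySem.List.slice_to pvNumStr (by omega)]
      rw [rulerLoop, dif_neg (by omega : ¬ rul + 10 ≤ num)]
      have hdiv : k / 10 = 0 := by omega
      have hmod : k % 10 = k := by omega
      rw [hdiv, hmod]
      simp [PySem.List.pyRepeat]

-- ===== VERDICT (by name: the statement is the Claim_ definition above) =====
theorem ruler_spec : Claim_equal_ruler := by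
  intro num _hdom
  unfold Spec_ruler ruler ruler_alt
  by_cases h : 0 ≤ num
  · have hmax : max num 0 = num := max_eq_left h
    have hnum : num = ((num.toNat : Nat) : Int) := by omega
    rw [hmax, loop_eq num.toNat num 0 1 [] [] (by omega), hnum]
    rw [show ((10 : Int)) = ((10 : Nat) : Int) from rfl, PySem.Int.floordiv_natCast,
      PySem.Int.mod_natCast, PySem.List.foldl_append_eq_flatMap]
    rw [PySem.List.slice_to_natCast]
    rw [show (((num.toNat / 10 : Nat) : Int) + 1) = 1 + ((num.toNat / 10 : Nat) : Int) by omega]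
    simp [hmax]
  · rw [rulerLoop, dif_neg (by omega : ¬ (0 : Int) ≤ num)]
    rw [show max num 0 = 0 from max_eq_right (by omega)]
    decide
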